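-- pv_equiv track=rewrite | github.com/stegua/AVC2023 | python/day08/solution.py | CycleNode
-- ===== SOURCE A (Python) =====
-- def CycleNode(node, cmd, C):
--     cur = node
--     idx = 1
--     visited = {}
--     while True:
--         for c in cmd:
--             cur = C[cur][c]
--             idx += 1
--         if cur in visited:
--             return idx-visited[cur]
--         visited[cur] = idx
-- ===== SOURCE B (Python) =====
-- def CycleNode(node, cmd, C):
--     # Memory-free re-implementation: advance len(C)+1 rounds to be sure we are
--     # inside the cycle, then measure the cycle length by walking once around it.
--     def f(n):
--         for c in cmd:
--             n = C[n][c]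
--         return n
--     y = node
--     for _ in range(len(C) + 1):
--         y = f(y)
--     lam = 1
--     z = f(y)
--     while z != y:
--         z = f(z)
--         lam += 1
--     return lam * len(cmd)
-- ===== Notes on version B (the rewrite author's own statement) =====
-- stated objective: alternative
-- what changed: Replaces the visited-dictionary-with-indices bookkeeping by a pointer algorithm: advance len(C)+1 rounds to land inside the cycle, then walk once around counting rounds, returning that count times len(cmd); B needs O(1) extra memory instead of a dict of all visited states.
-- outside the precondition, e.g. on CycleNode('a', 'X', {'a': {'X': 'a'}, 'b': {}}): A returns 1, B returns 1
import Mathlib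
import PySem

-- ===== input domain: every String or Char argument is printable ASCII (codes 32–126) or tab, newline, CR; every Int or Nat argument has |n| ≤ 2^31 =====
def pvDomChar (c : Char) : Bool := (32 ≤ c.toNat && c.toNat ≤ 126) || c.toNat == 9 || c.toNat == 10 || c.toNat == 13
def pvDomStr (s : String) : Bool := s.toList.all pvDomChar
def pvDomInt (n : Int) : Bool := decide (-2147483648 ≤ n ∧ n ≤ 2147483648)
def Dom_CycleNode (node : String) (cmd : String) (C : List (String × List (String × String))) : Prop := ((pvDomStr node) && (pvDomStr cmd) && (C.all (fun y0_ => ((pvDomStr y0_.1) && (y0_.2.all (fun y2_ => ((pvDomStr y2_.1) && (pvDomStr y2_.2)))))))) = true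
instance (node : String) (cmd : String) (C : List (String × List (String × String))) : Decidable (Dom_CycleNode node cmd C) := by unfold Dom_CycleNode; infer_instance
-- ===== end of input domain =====

-- B replaces A's visited-dictionary bookkeeping by a memory-free pointer walk (advance
-- |C|+1 rounds into the cycle, then walk once around it); equivalence of return values only.

-- ===== PORT A =====
-- shared by both ports: the Python expression C[cur][c] (both sources execute it verbatim)
def pvStep (C : List (String × List (String × String))) (n : String) (c : Char) : String :=
  (PySem.Dict.get? (PySem.Dict.mk ((PySem.Dict.get? (PySem.Dict.mk C) n).getD [])) (String.ofList [c])).getD ""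

-- A's 'while True' loop; the fuel only makes it total (under Pre_ it returns before fuel runs out)
def CycleNodeGo (cmd : List Char) (C : List (String × List (String × String)))
    (fuel : Nat) (cur : String) (idx : Int) (visited : PySem.Dict String Int) : Int :=
  match fuel with
  | 0 => 0
  | fuel + 1 =>
    let p := cmd.foldl (fun (q : String × Int) c => (pvStep C q.1 c, q.2 + 1)) (cur, idx)
    match PySem.Dict.get? visited p.1 with
    | some v => p.2 - v
    | none => CycleNodeGo cmd C fuel p.1 p.2 (PySem.Dict.insert visited p.1 p.2)

def CycleNode (node : String) (cmd : String) (C : List (String × List (String × String))) : Int :=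
  CycleNodeGo cmd.toList C (C.length + 2) node 1 PySem.Dict.empty

-- ===== PORT B =====
-- Source B's helper f: one round of commands
def CycleNodeAltRound (cmd : List Char) (C : List (String × List (String × String))) (n : String) : String :=
  cmd.foldl (pvStep C) n

-- Source B's 'while z != y' counting loop; fuel only makes it total
def CycleNodeAltLoop (cmd : List Char) (C : List (String × List (String × String)))
    (y : String) (fuel : Nat) (z : String) (lam : Int) : Int :=
  match fuel with
  | 0 => lam
  | fuel + 1 => if z == y then lam else CycleNodeAltLoop cmd C y fuel (CycleNodeAltRound cmd C z) (lam + 1)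

def CycleNode_alt (node : String) (cmd : String) (C : List (String × List (String × String))) : Int :=
  let y := (List.range (C.length + 1)).foldl (fun y _ => CycleNodeAltRound cmd.toList C y) node
  CycleNodeAltLoop cmd.toList C y (C.length + 2) (CycleNodeAltRound cmd.toList C y) 1 * (cmd.toList.length : Int)

-- ===== PRECONDITION & SPEC =====
-- Pre_ excludes inputs where a lookup C[cur][c] can raise KeyError, by requiring the command
-- map to be total and closed over ALL its keys (stronger than the reachable-part closure A
-- actually needs, but closed-form), and excludes duplicate keys in C or in an inner dict,
-- where the assoc-list first-match convention and Python's dict key collapse are both accidental.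
-- (With cmd = "" A touches no dict at all and returns 0, so nothing is required then.)
def Pre_CycleNode (node : String) (cmd : String) (C : List (String × List (String × String))) : Prop :=
  cmd = "" ∨
  ((C.map Prod.fst).Nodup ∧
   node ∈ C.map Prod.fst ∧
   (C.all fun p => (decide (p.2.map Prod.fst).Nodup) &&
     (cmd.toList.all fun c =>
       match PySem.Dict.get? (PySem.Dict.mk p.2) (String.ofList [c]) with
       | some v => (C.map Prod.fst).contains v
       | none => false)) = true)
instance (node : String) (cmd : String) (C : List (String × List (String × String))) : Decidable (Pre_CycleNode node cmd C) := by unfold Pre_CycleNode; infer_instance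

def pvWitness_CycleNode : String × String × (List (String × List (String × String))) :=
  ("a", "LR", [("a", [("L", "b"), ("R", "a")]), ("b", [("L", "a"), ("R", "b")])])

def Spec_CycleNode (node : String) (cmd : String) (C : List (String × List (String × String))) (out : Int) : Prop := out = CycleNode_alt node cmd C
instance (node : String) (cmd : String) (C : List (String × List (String × String))) (out : Int) : Decidable (Spec_CycleNode node cmd C out) := by unfold Spec_CycleNode; infer_instance

-- ===== CLAIM (what is proved, stated in full; the proofs are below) =====
def Claim_equal_CycleNode : Prop := ∀ (node : String) (cmd : String) (C : List (String × List (String × String))), Dom_CycleNode node cmd C → Pre_CycleNode node cmd C → Spec_CycleNode node cmd C (CycleNode node cmd C)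

-- ===== LEMMAS AND PROOFS =====

-- A's char loop carries (cur, idx); it computes one round and adds len(cmd) to idx.
theorem pvFoldlPair (cmd : List Char) (C : List (String × List (String × String))) (cur : String) (idx : Int) :
    cmd.foldl (fun (q : String × Int) c => (pvStep C q.1 c, q.2 + 1)) (cur, idx)
      = (CycleNodeAltRound cmd C cur, idx + cmd.length) := by
  induction cmd generalizing cur idx with
  | nil => simp [CycleNodeAltRound]
  | cons c cs ih =>
    simp only [List.foldl_cons, CycleNodeAltRound, ih]
    simp only [Prod.mk.injEq, true_and, List.length_cons]
    push_cast; ring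

theorem pvGetMkOfMemFst (C : List (String × List (String × String))) (v : String)
    (h : v ∈ C.map Prod.fst) :
    ∃ l, PySem.Dict.get? (PySem.Dict.mk C) v = some l ∧ (v, l) ∈ C := by
  induction C with
  | nil => simp at h
  | cons p ps ih =>
    obtain ⟨k, l0⟩ := p
    by_cases hv : k = v
    · subst hv
      exact ⟨l0, by simp [PySem.Dict.get?_mk_cons], by left⟩
    · have : v ∈ ps.map Prod.fst := by
        simp only [List.map_cons, List.mem_cons] at h
        tauto
      obtain ⟨l, hl, hm⟩ := ih this
      refine ⟨l, ?_, by right; exact hm⟩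
      rw [PySem.Dict.get?_mk_cons]
      simp [hv, hl]

-- closure: one command step stays inside the keys of C
theorem pvStepMem (C : List (String × List (String × String)))
    (c : Char) (n : String)
    (hcl : ∀ p ∈ C, ∃ v ∈ C.map Prod.fst, PySem.Dict.get? (PySem.Dict.mk p.2) (String.ofList [c]) = some v)
    (hn : n ∈ C.map Prod.fst) : pvStep C n c ∈ C.map Prod.fst := by
  obtain ⟨l, hl, hm⟩ := pvGetMkOfMemFst C n hn
  obtain ⟨v, hv, hget⟩ := hcl (n, l) hm
  simp [pvStep, hl, hget, hv]

theorem pvRoundMem (cmd : List Char) (C : List (String × List (String × String)))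
    (hcl : ∀ p ∈ C, ∀ c ∈ cmd, ∃ v ∈ C.map Prod.fst, PySem.Dict.get? (PySem.Dict.mk p.2) (String.ofList [c]) = some v)
    (n : String) (hn : n ∈ C.map Prod.fst) : CycleNodeAltRound cmd C n ∈ C.map Prod.fst := by
  induction cmd generalizing n with
  | nil => simpa [CycleNodeAltRound] using hn
  | cons c cs ih =>
    simp only [CycleNodeAltRound, List.foldl_cons]
    exact ih (fun p hp c' hc' => hcl p hp c' (by simp [hc'])) _
      (pvStepMem C c n (fun p hp => hcl p hp c (by simp)) hn)

-- assoc-list lookups in the visited model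
theorem pvDictGetNone (g : Nat → String) (w : Nat → Int) (l : List Nat) (key : String)
    (h : ∀ s ∈ l, g s ≠ key) :
    PySem.Dict.get? (PySem.Dict.mk (l.map fun s => (g s, w s))) key = none := by
  induction l with
  | nil => simp [PySem.Dict.get?]
  | cons s l ih =>
    simp only [List.map_cons, PySem.Dict.get?_mk_cons]
    have : (g s == key) = false := by
      simp only [beq_eq_false_iff_ne]; exact h s (by simp)
    simp [this]
    exact ih (fun t ht => h t (by simp [ht]))

theorem pvDictGetSome (g : Nat → String) (w : Nat → Int) (l : List Nat) (key : String) (i : Nat)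
    (hi : i ∈ l) (h : ∀ s ∈ l, g s = key ↔ s = i) :
    PySem.Dict.get? (PySem.Dict.mk (l.map fun s => (g s, w s))) key = some (w i) := by
  induction l with
  | nil => simp at hi
  | cons s l ih =>
    simp only [List.map_cons, PySem.Dict.get?_mk_cons]
    by_cases hs : g s = key
    · have hsi : s = i := (h s (by simp)).1 hs
      subst hsi
      simp [hs]
    · have hne : (g s == key) = false := by simp [hs]
      have hi' : i ∈ l := by
        rcases List.mem_cons.1 hi with h1 | h1
        · exact absurd ((h s (by simp)).2 h1.symm) hs
        · exact h1
      simp [hne]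
      exact ih hi' (fun t ht => h t (by simp [ht]))
  
-- visited after t rounds is the assoc list [(x 1, idx 1), …, (x t, idx t)]
theorem pvVisitedStep (g : Nat → String) (w : Nat → Int) (t : Nat)
    (hfresh : PySem.Dict.get? (PySem.Dict.mk ((List.range' 1 t).map fun s => (g s, w s))) (g (t+1)) = none) :
    PySem.Dict.insert (PySem.Dict.mk ((List.range' 1 t).map fun s => (g s, w s))) (g (t+1)) (w (t+1))
      = PySem.Dict.mk ((List.range' 1 (t+1)).map fun s => (g s, w s)) := by
  apply PySem.Dict.ext
  have hc : (PySem.Dict.mk ((List.range' 1 t).map fun s => (g s, w s))).contains (g (t+1)) = false := by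
    rw [PySem.Dict.contains_eq_isSome_get?, hfresh]; rfl
  rw [PySem.Dict.items_insert_of_not_contains _ _ hc]
  have h2 : List.range' 1 (t+1) = List.range' 1 t ++ [1 + 1 * t] := List.range'_concat
  rw [h2]
  simp [Nat.add_comm 1 t]

-- foldl over range with a constant function is iteration
theorem pvFoldlRangeIter (f : String → String) (node : String) (n : Nat) :
    (List.range n).foldl (fun y _ => f y) node = f^[n] node := by
  induction n with
  | zero => simp
  | succ n ih => rw [List.range_succ, List.foldl_append, ih]; simp [Function.iterate_succ_apply']

-- trivial round for empty cmd
theorem pvFoldlId (node : String) (l : List Nat) : l.foldl (fun (y : String) _ => y) node = node := by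
  induction l with
  | nil => rfl
  | cons a l ih => simp only [List.foldl_cons]; exact ih

-- ===== the two sides against the canonical cycle data =====
-- Throughout: x t = t rounds from node, j₀ = first index whose value recurs, i₀ its earlier
-- partner, λ = j₀ - i₀ the cycle length in rounds.

-- the orbit repeats with period j - i from index i on
theorem pvPer (f : String → String) (node : String) (i j : Nat) (hij : i < j)
    (hx : f^[j] node = f^[i] node) : ∀ d, f^[i + d + (j - i)] node = f^[i + d] node := by
  intro d
  induction d with
  | zero =>
    have e : i + 0 + (j - i) = j := by omega
    rw [e]; simpa using hx
  | succ d ih =>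
    have e : i + (d + 1) + (j - i) = (i + d + (j - i)) + 1 := by omega
    rw [e, Function.iterate_succ_apply', ih]
    exact (Function.iterate_succ_apply' f (i + d) node).symm

-- hence indices from i on may be reduced modulo j - i
theorem pvMod (f : String → String) (node : String) (i j : Nat) (hij : i < j)
    (hx : f^[j] node = f^[i] node) : ∀ d, f^[i + d] node = f^[i + d % (j - i)] node := by
  intro d
  induction d using Nat.strong_induction_on with
  | _ d ih =>
    by_cases hd : d < j - i
    · rw [Nat.mod_eq_of_lt hd]
    · have hle : j - i ≤ d := Nat.le_of_not_lt hd
      have hpos : 0 < j - i := by omega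
      have e : i + d = i + (d - (j - i)) + (j - i) := by omega
      rw [e, pvPer f node i j hij hx, ih (d - (j - i)) (by omega),
        ← Nat.mod_eq_sub_mod hle]

theorem pvMainNonempty (node : String) (cmd : List Char) (C : List (String × List (String × String)))
    (hnode : node ∈ C.map Prod.fst)
    (hcl : ∀ p ∈ C, ∀ c ∈ cmd, ∃ v ∈ C.map Prod.fst, PySem.Dict.get? (PySem.Dict.mk p.2) (String.ofList [c]) = some v) :
    CycleNodeGo cmd C (C.length + 2) node 1 PySem.Dict.empty
      = CycleNodeAltLoop cmd C ((CycleNodeAltRound cmd C)^[C.length + 1] node) (C.length + 2)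
          ((CycleNodeAltRound cmd C)^[C.length + 2] node) 1 * (cmd.length : Int) := by
  classical
  set f := CycleNodeAltRound cmd C with hf
  set N := C.length with hN
  set m : Int := (cmd.length : Int) with hm
  -- every state of the orbit is a key of C
  have hxmem : ∀ t, f^[t] node ∈ C.map Prod.fst := by
    intro t
    induction t with
    | zero => simpa using hnode
    | succ t ih =>
      rw [Function.iterate_succ_apply']
      exact pvRoundMem cmd C hcl _ ih
  -- pigeonhole: two of the first N+1 orbit values coincide
  have hcard : (C.map Prod.fst).toFinset.card ≤ N := by
    calc (C.map Prod.fst).toFinset.card ≤ (C.map Prod.fst).length := List.toFinset_card_le _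
    _ = N := by simp [hN]
  have hpig : ∃ a ∈ Finset.range (N + 1), ∃ b ∈ Finset.range (N + 1),
      a ≠ b ∧ f^[a] node = f^[b] node := by
    apply Finset.exists_ne_map_eq_of_card_lt_of_maps_to
    · simpa using Nat.lt_succ_of_le hcard
    · intro a _
      exact List.mem_toFinset.2 (hxmem a)
  -- hence a collision x i = x j with 0 < i < j ≤ N+1
  have hcol : ∃ j, j ≤ N + 1 ∧ ∃ i ∈ Finset.range j, 0 < i ∧ f^[i] node = f^[j] node := by
    obtain ⟨a, ha, b, hb, hab, hx⟩ := hpig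
    simp only [Finset.mem_range] at ha hb
    rcases lt_or_gt_of_ne hab with h | h
    · refine ⟨b + 1, by omega, a + 1, Finset.mem_range.2 (by omega), by omega, ?_⟩
      rw [Function.iterate_succ_apply', Function.iterate_succ_apply', hx]
    · refine ⟨a + 1, by omega, b + 1, Finset.mem_range.2 (by omega), by omega, ?_⟩
      rw [Function.iterate_succ_apply', Function.iterate_succ_apply', hx]
  have hex : ∃ j, ∃ i ∈ Finset.range j, 0 < i ∧ f^[i] node = f^[j] node := by
    obtain ⟨j, _, h⟩ := hcol; exact ⟨j, h⟩
  -- j₀ = the FIRST index whose value was seen before (A's stopping round)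
  set j₀ := Nat.find hex with hj₀
  obtain ⟨i₁, hi₁r, hi₁pos, hi₁x⟩ := Nat.find_spec hex
  have hi₁lt : i₁ < j₀ := Finset.mem_range.1 hi₁r
  have hj₀le : j₀ ≤ N + 1 := by
    obtain ⟨j, hj, h⟩ := hcol
    exact le_trans (Nat.find_le h) hj
  -- the orbit is injective strictly before j₀
  have hinj : ∀ s s', 0 < s → s < s' → s' < j₀ → f^[s] node ≠ f^[s'] node := by
    intro s s' hs hss' hs' heq
    exact Nat.find_min hex hs' ⟨s, Finset.mem_range.2 hss', hs, heq⟩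
  -- i₁ is the unique earlier partner of j₀
  have huniq : ∀ s, 0 < s → s < j₀ → (f^[s] node = f^[j₀] node ↔ s = i₁) := by
    intro s hs hsj
    constructor
    · intro heq
      by_contra hne
      have heq2 : f^[s] node = f^[i₁] node := heq.trans hi₁x.symm
      rcases lt_or_gt_of_ne hne with h | h
      · exact hinj s i₁ hs h hi₁lt heq2
      · exact hinj i₁ s hi₁pos h hsj heq2.symm
    · intro h; rw [h]; exact hi₁x
  set L := j₀ - i₁ with hL
  have hLpos : 0 < L := by omega
  have hxji : f^[j₀] node = f^[i₁] node := hi₁x.symm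
  have hLN : L ≤ N := by omega
  -- ===== A's loop returns L * m =====
  have hA : ∀ fuel, ∀ t, j₀ ≤ t + fuel → t < j₀ →
      CycleNodeGo cmd C fuel (f^[t] node) ((t : Int) * m + 1)
        (PySem.Dict.mk ((List.range' 1 t).map fun s => (f^[s] node, (s : Int) * m + 1)))
        = (L : Int) * m := by
    intro fuel
    induction fuel with
    | zero => intro t h1 h2; omega
    | succ fuel ih =>
      intro t h1 h2
      simp only [CycleNodeGo, pvFoldlPair, ← hf, ← hm]
      rw [← Function.iterate_succ_apply' f t node]
      by_cases hjt : t + 1 = j₀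
      · have hget := pvDictGetSome (fun s => f^[s] node) (fun s => (s : Int) * m + 1)
          (List.range' 1 t) (f^[t + 1] node) i₁
          (List.mem_range'_1.2 (by omega))
          (by
            intro s hsr
            have hsb := List.mem_range'_1.1 hsr
            rw [hjt]
            exact huniq s (by omega) (by omega))
        simp only [hget]
        have hc2 : ((t : Int) + 1) = (j₀ : Int) := by exact_mod_cast congrArg (Nat.cast (R := Int)) hjt
        have hc1 : ((L : Nat) : Int) = (j₀ : Int) - (i₁ : Int) := by
          rw [hL]; push_cast [Nat.cast_sub (le_of_lt hi₁lt)]; ring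
        rw [hc1, ← hc2]; ring
      · have hlt : t + 1 < j₀ := by omega
        have hnone := pvDictGetNone (fun s => f^[s] node) (fun s => (s : Int) * m + 1)
          (List.range' 1 t) (f^[t + 1] node)
          (by
            intro s hsr
            have hsb := List.mem_range'_1.1 hsr
            exact hinj s (t + 1) (by omega) (by omega) hlt)
        simp only [hnone]
        have harith : (t : Int) * m + 1 + m = ((t + 1 : Nat) : Int) * m + 1 := by push_cast; ring
        rw [harith]
        rw [pvVisitedStep (fun s => f^[s] node) (fun s => (s : Int) * m + 1) t hnone]
        exact ih (t + 1) (by omega) hlt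
  -- ===== B's loop returns L =====
  have hperTop : f^[N + 1 + L] node = f^[N + 1] node := by
    have h := pvPer f node i₁ j₀ hi₁lt hxji (N + 1 - i₁)
    have e1 : i₁ + (N + 1 - i₁) + (j₀ - i₁) = N + 1 + L := by omega
    have e2 : i₁ + (N + 1 - i₁) = N + 1 := by omega
    rwa [e1, e2] at h
  have hneSmall : ∀ k, 0 < k → k < L → f^[N + 1 + k] node ≠ f^[N + 1] node := by
    intro k hk hkL heq
    have h1 := pvMod f node i₁ j₀ hi₁lt hxji (N + 1 - i₁ + k)
    have h2 := pvMod f node i₁ j₀ hi₁lt hxji (N + 1 - i₁)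
    have e1 : i₁ + (N + 1 - i₁ + k) = N + 1 + k := by omega
    rw [e1] at h1
    have e2 : i₁ + (N + 1 - i₁) = N + 1 := by omega
    rw [e2] at h2
    set a := (N + 1 - i₁ + k) % (j₀ - i₁) with ha
    set b := (N + 1 - i₁) % (j₀ - i₁) with hb
    have halt : a < L := Nat.mod_lt _ (by omega)
    have hblt : b < L := Nat.mod_lt _ (by omega)
    have heq2 : f^[i₁ + a] node = f^[i₁ + b] node := by rw [← h1, ← h2, heq]
    by_cases hab : a = b
    · -- equal residues would make L divide k
      have hmodeq : Nat.ModEq (j₀ - i₁) (N + 1 - i₁) (N + 1 - i₁ + k) := by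
        unfold Nat.ModEq; rw [← ha, ← hb, hab]
      have hdvd : (j₀ - i₁) ∣ (N + 1 - i₁ + k) - (N + 1 - i₁) :=
        (Nat.modEq_iff_dvd' (Nat.le_add_right _ _)).1 hmodeq
      rw [Nat.add_sub_cancel_left] at hdvd
      have := Nat.le_of_dvd hk hdvd
      omega
    · rcases lt_or_gt_of_ne hab with h | h
      · exact hinj (i₁ + a) (i₁ + b) (by omega) (by omega) (by omega) heq2
      · exact hinj (i₁ + b) (i₁ + a) (by omega) (by omega) (by omega) heq2.symm
  have hB : ∀ fuel, ∀ k, 0 < k → k ≤ L → L ≤ k + fuel →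
      CycleNodeAltLoop cmd C (f^[N + 1] node) fuel (f^[N + 1 + k] node) (k : Int) = (L : Int) := by
    intro fuel
    induction fuel with
    | zero =>
      intro k h0 h1 h2
      have : k = L := by omega
      subst this
      simp [CycleNodeAltLoop]
    | succ fuel ih =>
      intro k h0 h1 h2
      simp only [CycleNodeAltLoop]
      by_cases heq : f^[N + 1 + k] node = f^[N + 1] node
      · have hkL : k = L := by
          by_contra hne
          exact hneSmall k h0 (by omega) heq
        have hbeq : (f^[N + 1 + k] node == f^[N + 1] node) = true := beq_iff_eq.2 heq
        rw [hbeq, if_pos rfl, hkL]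
      · have hkL : k < L := by
          rcases Nat.lt_or_ge k L with h | h
          · exact h
          · exfalso; apply heq
            have : k = L := by omega
            rw [this]; exact hperTop
        have hbeq : (f^[N + 1 + k] node == f^[N + 1] node) = false := beq_eq_false_iff_ne.2 heq
        rw [hbeq]
        simp only [Bool.false_eq_true, if_false]
        rw [← hf, ← Function.iterate_succ_apply' f (N + 1 + k) node]
        have : (k : Int) + 1 = ((k + 1 : Nat) : Int) := by push_cast; ring
        rw [this]
        exact ih (k + 1) (by omega) (by omega) (by omega)
  -- ===== assemble =====
  have hAstart : CycleNodeGo cmd C (N + 2) node 1 PySem.Dict.empty = (L : Int) * m := by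
    have h := hA (N + 2) 0 (by omega) (by omega)
    simpa using h
  have hBstart : CycleNodeAltLoop cmd C (f^[N + 1] node) (N + 2) (f^[N + 2] node) (1 : Int) = (L : Int) := by
    have h := hB (N + 2) 1 (by omega) (by omega) (by omega)
    have h1 : ((1 : Nat) : Int) = (1 : Int) := by norm_num
    rw [h1] at h
    exact h
  rw [hAstart, hBstart]

-- ===== VERDICT (by name: the statement is the Claim_ definition above) =====
theorem CycleNode_spec : Claim_equal_CycleNode := by
  intro node cmd C _hdom hpre
  unfold Spec_CycleNode
  rcases hpre with hempty | ⟨_hnodup, hnode, hall⟩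
  · -- cmd = "": A returns 0 on its second round, B counts one lap of the identity round
    subst hempty
    have hto : ("" : String).toList = [] := rfl
    simp only [CycleNode, CycleNode_alt, hto]
    have hround : ∀ z, CycleNodeAltRound [] C z = z := fun z => rfl
    simp only [CycleNodeGo, CycleNodeAltLoop, List.foldl_nil, hround]
    rw [pvFoldlId]
    simp [PySem.Dict.get?_empty, PySem.Dict.get?_insert_self]
  · -- cmd ≠ ""
    simp only [CycleNode, CycleNode_alt]
    rw [pvFoldlRangeIter]
    rw [show (CycleNodeAltRound cmd.toList C ((CycleNodeAltRound cmd.toList C)^[C.length + 1] node))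
        = (CycleNodeAltRound cmd.toList C)^[C.length + 2] node from (Function.iterate_succ_apply' _ _ _).symm]
    have hcl : ∀ p ∈ C, ∀ c ∈ cmd.toList,
        ∃ v ∈ C.map Prod.fst, PySem.Dict.get? (PySem.Dict.mk p.2) (String.ofList [c]) = some v := by
      intro p hp c hc
      have h1 := List.all_eq_true.1 hall p hp
      have h2 := List.all_eq_true.1 (Bool.and_eq_true_iff.1 h1).2 c hc
      cases hg : PySem.Dict.get? (PySem.Dict.mk p.2) (String.ofList [c]) with
      | none => rw [hg] at h2; simp at h2
      | some v =>
        rw [hg] at h2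
        exact ⟨v, by simpa using h2, rfl⟩
    exact pvMainNonempty node cmd.toList C hnode hcl
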